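-- pv_equiv track=rewrite | github.com/borjangly/calculator | legion.py | legion_level
-- ===== SOURCE A (Python) =====
-- def legion_level(legion):
--     level_list = []
--
--     for character in legion:
--         level_list.append(character["level"])
--
--     level_list.sort(reverse=True)
--     total_level = 0
--
--     for j in range(0, min(len(level_list), 42)):
--         total_level += level_list[j]
--
--     return total_level
-- ===== SOURCE B (Python) =====
-- def legion_level(legion):
--     # Bounded selection: keep only the 42 largest levels seen so far in an
--     # ascending list `top`; evict the smallest when the bound is exceeded.
--     top = []
--     for character in legion:
--         x = character["level"]
--         i = 0
--         while i < len(top) and top[i] < x: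
--             i += 1
--         top.insert(i, x)
--         if len(top) > 42:
--             top.pop(0)
--     return sum(top)
-- ===== Notes on version B (the rewrite author's own statement) =====
-- stated objective: alternative
-- what changed: Instead of collecting all levels, fully sorting them descending and summing a 42-slice, B makes one pass maintaining a bounded ascending list of at most the 42 largest levels seen (sorted insertion, evict the minimum) and returns its sum.
import Mathlib
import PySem

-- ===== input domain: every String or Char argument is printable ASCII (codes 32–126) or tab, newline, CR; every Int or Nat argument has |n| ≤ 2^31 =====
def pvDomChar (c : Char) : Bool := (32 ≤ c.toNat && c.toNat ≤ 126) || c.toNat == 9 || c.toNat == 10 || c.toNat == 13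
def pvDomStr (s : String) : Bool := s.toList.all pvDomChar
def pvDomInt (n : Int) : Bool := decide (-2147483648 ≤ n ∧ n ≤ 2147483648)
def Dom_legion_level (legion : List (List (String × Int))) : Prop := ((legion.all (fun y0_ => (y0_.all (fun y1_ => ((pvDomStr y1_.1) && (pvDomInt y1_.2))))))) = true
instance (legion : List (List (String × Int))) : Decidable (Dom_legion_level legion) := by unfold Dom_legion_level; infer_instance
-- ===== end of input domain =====

-- B replaces "collect all levels, sort descending, sum a 42-slice" by one pass that
-- maintains a bounded ascending list of at most the 42 largest levels seen so far.

-- ===== PORT A =====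
-- character["level"]: first-match association-list lookup, total form with default 0;
-- exact under Pre_legion_level (Python raises KeyError exactly where find? is none).
def pvGetLevel (c : List (String × Int)) : Int :=
  ((c.find? (fun p => p.1 == "level")).map (·.2)).getD 0

def legion_level (legion : List (List (String × Int))) : Int :=
  let level_list := legion.foldl (fun acc c => acc ++ [pvGetLevel c]) []
  let s := PySem.List.sorted level_list (fun x => x) true
  (PySem.List.pyRange 0 (min ((s.length : Int)) 42) 1).foldl
    (fun t j => t + PySem.List.pyGetD s j 0) 0

-- ===== PORT B =====
-- Source B's hand-written insertion: advance while top[i] < x, insert x there.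
def pvInsertAsc (x : Int) : List Int → List Int
  | [] => [x]
  | y :: ys => if y < x then y :: pvInsertAsc x ys else x :: y :: ys

-- one loop body of Source B: sorted insert, then pop the minimum if the bound 42 is exceeded
def pvStep (top : List Int) (x : Int) : List Int :=
  let t := pvInsertAsc x top
  if 42 < t.length then t.tail else t

def legion_level_alt (legion : List (List (String × Int))) : Int :=
  (legion.foldl (fun top c => pvStep top (pvGetLevel c)) []).sum

-- ===== PRECONDITION & SPEC =====
-- Pre_ excludes exactly the legions containing a character without a "level" key,
-- on which the Python A (and B) raises KeyError.
def Pre_legion_level (legion : List (List (String × Int))) : Prop :=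
  ∀ c ∈ legion, ∃ p ∈ c, p.1 = "level"
instance (legion : List (List (String × Int))) : Decidable (Pre_legion_level legion) := by
  unfold Pre_legion_level; infer_instance

def pvWitness_legion_level : (List (List (String × Int))) :=
  [[("level", 30)], [("level", 7), ("name", 2)]]

def Spec_legion_level (legion : List (List (String × Int))) (out : Int) : Prop := out = legion_level_alt legion
instance (legion : List (List (String × Int))) (out : Int) : Decidable (Spec_legion_level legion out) := by unfold Spec_legion_level; infer_instance

-- ===== CLAIM (what is proved, stated in full; the proofs are below) =====
def Claim_equal_legion_level : Prop := ∀ (legion : List (List (String × Int))), Dom_legion_level legion → Pre_legion_level legion → Spec_legion_level legion (legion_level legion)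

-- ===== LEMMAS AND PROOFS =====

-- Source B's insertion coincides with Mathlib's orderedInsert (conditions are negations)
theorem pvInsertAsc_eq (x : Int) (l : List Int) :
    pvInsertAsc x l = List.orderedInsert (· ≤ ·) x l := by
  induction l with
  | nil => rfl
  | cons y ys ih =>
    simp only [pvInsertAsc, List.orderedInsert, ih]
    rcases le_or_gt x y with h | h
    · simp [not_lt.2 h, h]
    · simp [h, not_le.2 h]

-- the ascending insertion sort that B's fold incrementally maintains a suffix of
def pvIns (l : List Int) : List Int :=
  l.foldl (fun acc x => List.orderedInsert (· ≤ ·) x acc) []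

theorem pvIns_append (l : List Int) (x : Int) :
    pvIns (l ++ [x]) = List.orderedInsert (· ≤ ·) x (pvIns l) := by
  simp [pvIns]

theorem pvIns_perm (l : List Int) : (pvIns l).Perm l := by
  induction l using List.reverseRecOn with
  | nil => simp [pvIns]
  | append_singleton l x ih =>
    rw [pvIns_append]
    exact ((List.perm_orderedInsert _ x _).trans (ih.cons x)).trans
      (List.perm_append_singleton x l).symm

theorem pvIns_pairwise (l : List Int) : (pvIns l).Pairwise (· ≤ ·) := by
  induction l using List.reverseRecOn with
  | nil => simp [pvIns]
  | append_singleton l x ih =>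
    rw [pvIns_append]
    exact ih.orderedInsert x _

theorem pvIns_length (l : List Int) : (pvIns l).length = l.length :=
  (pvIns_perm l).length_eq

-- dropping k elements before or after an ordered insert into a sorted list
theorem drop_orderedInsert (x : Int) (k : Nat) (l : List Int) (hs : l.Pairwise (· ≤ ·)) :
    (List.orderedInsert (· ≤ ·) x l).drop (k + 1)
      = (List.orderedInsert (· ≤ ·) x (l.drop k)).tail := by
  induction k generalizing l with
  | zero => simp [List.drop_one]
  | succ k ih =>
    cases l with
    | nil => simp [List.orderedInsert]
    | cons y ys =>
      rcases List.pairwise_cons.1 hs with ⟨hy, hys⟩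
      by_cases hxy : x ≤ y
      · simp only [List.orderedInsert, if_pos hxy, List.drop_succ_cons]
        cases hd : ys.drop k with
        | nil => simp [List.orderedInsert]
        | cons z zs =>
          have hz : z ∈ ys := List.mem_of_mem_drop (hd ▸ List.mem_cons_self)
          have hxz : x ≤ z := le_trans hxy (hy z hz)
          simp [List.orderedInsert, if_pos hxz]
      · simp only [List.orderedInsert, if_neg hxy, List.drop_succ_cons]
        exact ih ys hys

-- one loop body of Source B, expressed on the sorted suffix it maintains
theorem pvStep_drop (x : Int) (l : List Int) (hs : l.Pairwise (· ≤ ·)) :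
    pvStep (l.drop (l.length - 42)) x
      = (List.orderedInsert (· ≤ ·) x l).drop (l.length + 1 - 42) := by
  simp only [pvStep, pvInsertAsc_eq]
  by_cases h : l.length < 42
  · have h0 : l.length - 42 = 0 := by omega
    have h1 : l.length + 1 - 42 = 0 := by omega
    have hlen : (List.orderedInsert (· ≤ ·) x l).length = l.length + 1 :=
      List.orderedInsert_length _ l x
    rw [h0, h1, List.drop_zero, List.drop_zero, if_neg (by omega)]
  · have hdl : (l.drop (l.length - 42)).length = 42 := by
      rw [List.length_drop]; omega
    have hlen : (List.orderedInsert (· ≤ ·) x (l.drop (l.length - 42))).length = 43 := by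
      rw [List.orderedInsert_length, hdl]
    rw [if_pos (by omega), ← drop_orderedInsert x (l.length - 42) l hs]
    congr 1
    omega

-- B's fold maintains exactly the top-42 suffix of the ascending insertion sort
theorem foldl_pvStep (l : List Int) :
    l.foldl pvStep [] = (pvIns l).drop (l.length - 42) := by
  induction l using List.reverseRecOn with
  | nil => simp [pvIns]
  | append_singleton l x ih =>
    rw [List.foldl_append, List.foldl_cons, List.foldl_nil, ih,
      ← pvIns_length l, pvStep_drop x (pvIns l) (pvIns_pairwise l), ← pvIns_append]
    simp [pvIns_length]

-- Python's sorted(…, reverse=True) on Ints is the reverse of the ascending insertion sort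
theorem sorted_rev_eq_reverse_pvIns (l : List Int) :
    PySem.List.sorted l (fun x => x) true = (pvIns l).reverse := by
  refine List.Perm.eq_of_pairwise (fun a b _ _ h1 h2 => le_antisymm h2 h1)
    (PySem.List.sorted_pairwise_rev l (fun x => x)) ?_
    ((PySem.List.sorted_perm l (fun x => x) true).trans
      ((pvIns_perm l).symm.trans (List.reverse_perm (pvIns l)).symm))
  rw [List.pairwise_reverse]
  exact pvIns_pairwise l

-- A's index loop sums the first min(n, 42) elements, i.e. the 42-take
theorem sum_loop_take (s : List Int) :
    (PySem.List.pyRange 0 (min ((s.length : Int)) 42) 1).foldl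
      (fun t j => t + PySem.List.pyGetD s j 0) 0 = (s.take 42).sum := by
  have hmin : min ((s.length : Int)) 42 = (((s.take 42).length : Nat) : Int) := by
    rw [List.length_take]
    omega
  rw [hmin]
  have hcongr : (PySem.List.pyRange 0 (((s.take 42).length : Nat) : Int) 1).foldl
      (fun t j => t + PySem.List.pyGetD s j 0) 0
      = (PySem.List.pyRange 0 (((s.take 42).length : Nat) : Int) 1).foldl
      (fun t j => t + PySem.List.pyGetD (s.take 42) j 0) 0 := by
    refine PySem.List.foldl_congr_mem _ _ _ _ (fun t j hj => ?_)
    have hj' := (PySem.List.mem_pyRange_one).1 hj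
    have h0 : (0:Int) ≤ j := hj'.1
    have hlt : j.toNat < (s.take 42).length := by
      have := hj'.2
      omega
    have hlt' : j.toNat < s.length := by
      rw [List.length_take] at hlt
      omega
    rw [PySem.List.pyGetD_eq_getElem s 0 h0 (by omega),
      PySem.List.pyGetD_eq_getElem (s.take 42) 0 h0 (by omega),
      List.getElem_take]
  rw [hcongr, PySem.List.foldl_pyRange_zero_pyGetD' (s.take 42) 0 (fun t v => t + v) 0]
  exact (List.sum_eq_foldl).symm

-- ===== VERDICT (by name: the statement is the Claim_ definition above) =====
theorem legion_level_spec : Claim_equal_legion_level := by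
  intro legion _ _
  unfold Spec_legion_level legion_level legion_level_alt
  rw [PySem.List.foldl_append_singleton_eq_map, List.nil_append]
  set L := legion.map pvGetLevel with hL
  have hfold : (legion.foldl (fun top c => pvStep top (pvGetLevel c)) []) = L.foldl pvStep [] := by
    rw [hL, List.foldl_map]
  rw [hfold, foldl_pvStep, sum_loop_take, sorted_rev_eq_reverse_pvIns,
    List.take_reverse, List.sum_reverse, pvIns_length]
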